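-- pv_equiv track=rewrite | github.com/jonleewh/DSA4264-Project | src/create_test/clean_freshgrad_jobs.py | split_hard_soft_skills
-- ===== SOURCE A (Python) =====
-- SOFT_SKILL_HINTS = [
--     "communication",
--     "interpersonal",
--     "teamwork",
--     "team player",
--     "leadership",
--     "problem solving",
--     "adaptability",
--     "time management",
--     "stakeholder",
--     "presentation",
--     "critical thinking",
--     "self-motivated",
--     "work independently",
--     "collaboration",
--     "customer service",
--     "attention to detail",
-- ]
--
-- GENERIC_SOFT_SKILLS = {
--     "communication",
--     "communications",
--     "interpersonal",
--     "teamwork",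
--     "leadership",
--     "problem solving",
--     "analytical skills",
-- }
--
-- def split_hard_soft_skills(skills: list[str]) -> tuple[list[str], list[str]]:
--     hard, soft = [], []
--     seen_hard, seen_soft = set(), set()
--
--     for skill in skills:
--         s = skill.lower()
--         is_soft = any(hint in s for hint in SOFT_SKILL_HINTS) or s in GENERIC_SOFT_SKILLS
--         if is_soft:
--             if s not in seen_soft:
--                 soft.append(skill)
--                 seen_soft.add(s)
--         else:
--             if s not in seen_hard:
--                 hard.append(skill)
--                 seen_hard.add(s)
--     return hard, soft
-- ===== SOURCE B (Python) =====
-- SOFT_SKILL_HINTS = [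
--     "communication",
--     "interpersonal",
--     "teamwork",
--     "team player",
--     "leadership",
--     "problem solving",
--     "adaptability",
--     "time management",
--     "stakeholder",
--     "presentation",
--     "critical thinking",
--     "self-motivated",
--     "work independently",
--     "collaboration",
--     "customer service",
--     "attention to detail",
-- ]
--
-- GENERIC_SOFT_SKILLS = {
--     "communication",
--     "communications",
--     "interpersonal",
--     "teamwork",
--     "leadership",
--     "problem solving",
--     "analytical skills",
-- }
--
--
-- def _is_soft(s):
--     return any(hint in s for hint in SOFT_SKILL_HINTS) or s in GENERIC_SOFT_SKILLS
--
--
-- def split_hard_soft_skills(skills):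
--     # single global dedup pass on the lowercase key, then two filtering passes
--     seen = set()
--     unique = []
--     for skill in skills:
--         key = skill.lower()
--         if key not in seen:
--             seen.add(key)
--             unique.append(skill)
--     hard = [sk for sk in unique if not _is_soft(sk.lower())]
--     soft = [sk for sk in unique if _is_soft(sk.lower())]
--     return hard, soft
-- ===== Notes on version B (the rewrite author's own statement) =====
-- stated objective: alternative
-- what changed: Replaces A's single loop that classifies each skill and dedups per category with two separate seen-sets by one global order-preserving dedup pass over a single lowercase-keyed seen set followed by two filter passes applying the soft-skill predicate; equivalent because classification is deterministic per lowercase key, so global dedup equals per-category dedup.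
import Mathlib
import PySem

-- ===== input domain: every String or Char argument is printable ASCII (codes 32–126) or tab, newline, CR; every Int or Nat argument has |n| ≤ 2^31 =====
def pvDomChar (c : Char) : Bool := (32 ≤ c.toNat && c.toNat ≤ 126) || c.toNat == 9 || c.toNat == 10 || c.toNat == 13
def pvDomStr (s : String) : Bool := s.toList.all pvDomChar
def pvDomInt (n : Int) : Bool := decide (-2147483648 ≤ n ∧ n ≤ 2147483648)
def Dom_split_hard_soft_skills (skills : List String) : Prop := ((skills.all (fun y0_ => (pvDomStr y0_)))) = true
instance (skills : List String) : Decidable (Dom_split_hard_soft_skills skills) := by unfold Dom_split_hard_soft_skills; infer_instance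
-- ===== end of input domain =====

-- B restructures A: one global lowercase-keyed dedup pass, then two filter passes (alternative decomposition).

-- module constants shared by both versions
def softSkillHints : List String :=
  ["communication", "interpersonal", "teamwork", "team player", "leadership",
   "problem solving", "adaptability", "time management", "stakeholder",
   "presentation", "critical thinking", "self-motivated", "work independently",
   "collaboration", "customer service", "attention to detail"]

def genericSoftSkills : PySem.Set String :=
  PySem.Set.ofList ["communication", "communications", "interpersonal", "teamwork",
                    "leadership", "problem solving", "analytical skills"]

-- ===== PORT A =====
-- the for loop, carrying (hard, soft, seen_hard, seen_soft)
def splitLoopA : List String → List String → List String → PySem.Set String → PySem.Set String → List String × List String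
  | [], hard, soft, _, _ => (hard, soft)
  | skill :: rest, hard, soft, seenHard, seenSoft =>
    let s := PySem.Str.lower skill
    let isSoft := softSkillHints.any (fun hint => PySem.Str.isIn hint s) || PySem.Set.contains genericSoftSkills s
    if isSoft then
      if PySem.Set.contains seenSoft s then
        splitLoopA rest hard soft seenHard seenSoft
      else
        splitLoopA rest hard (soft ++ [skill]) seenHard (PySem.Set.add seenSoft s)
    else
      if PySem.Set.contains seenHard s then
        splitLoopA rest hard soft seenHard seenSoft
      else
        splitLoopA rest (hard ++ [skill]) soft (PySem.Set.add seenHard s) seenSoft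

def split_hard_soft_skills (skills : List String) : List String × List String :=
  splitLoopA skills [] [] PySem.Set.empty PySem.Set.empty

-- ===== PORT B =====
def pvIsSoft (s : String) : Bool :=
  softSkillHints.any (fun hint => PySem.Str.isIn hint s) || PySem.Set.contains genericSoftSkills s

-- B's dedup loop, carrying (unique, seen)
def dedupLoopB : List String → List String → PySem.Set String → List String
  | [], unique, _ => unique
  | skill :: rest, unique, seen =>
    let key := PySem.Str.lower skill
    if PySem.Set.contains seen key then dedupLoopB rest unique seen
    else dedupLoopB rest (unique ++ [skill]) (PySem.Set.add seen key)

def split_hard_soft_skills_alt (skills : List String) : List String × List String :=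
  let unique := dedupLoopB skills [] PySem.Set.empty
  (unique.filter (fun sk => !(pvIsSoft (PySem.Str.lower sk))),
   unique.filter (fun sk => pvIsSoft (PySem.Str.lower sk)))

-- ===== PRECONDITION & SPEC =====
def Spec_split_hard_soft_skills (skills : List String) (out : List String × List String) : Prop := out = split_hard_soft_skills_alt skills
instance (skills : List String) (out : List String × List String) : Decidable (Spec_split_hard_soft_skills skills out) := by unfold Spec_split_hard_soft_skills; infer_instance

-- ===== CLAIM (what is proved, stated in full; the proofs are below) =====
def Claim_equal_split_hard_soft_skills : Prop := ∀ (skills : List String), Dom_split_hard_soft_skills skills → Spec_split_hard_soft_skills skills (split_hard_soft_skills skills)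

-- ===== LEMMAS AND PROOFS =====

theorem contains_add (s : PySem.Set String) (x y : String) :
    PySem.Set.contains (PySem.Set.add s x) y = (PySem.Set.contains s y || x == y) := by
  simp only [PySem.Set.contains, PySem.Set.add]
  split_ifs with h
  · by_cases hxy : x = y
    · subst hxy; simp_all
    · have : (x == y) = false := beq_false_of_ne hxy
      simp [this]
  · by_cases hxy : x = y
    · subst hxy; simp_all
    · have hb : (x == y) = false := beq_false_of_ne hxy
      rw [List.contains_append]
      simp only [hb, Bool.or_false]
      simp
      exact fun hh => absurd hh.symm hxy

-- accumulator-free form of B's dedup loop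
def pureDedup : List String → PySem.Set String → List String
  | [], _ => []
  | skill :: rest, seen =>
    let key := PySem.Str.lower skill
    if PySem.Set.contains seen key then pureDedup rest seen
    else skill :: pureDedup rest (PySem.Set.add seen key)

theorem dedupLoopB_eq_pureDedup (skills : List String) :
    ∀ (u : List String) (seen : PySem.Set String),
      dedupLoopB skills u seen = u ++ pureDedup skills seen := by
  induction skills with
  | nil => intro u seen; simp [dedupLoopB, pureDedup]
  | cons t ts ih =>
    intro u seen
    simp only [dedupLoopB, pureDedup]
    split
    · exact ih u seen
    · rw [ih (u ++ [t]) _]; simp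

theorem splitLoopA_eq (skills : List String) :
    ∀ (hard soft : List String) (sh ss seen : PySem.Set String),
      (∀ x, PySem.Set.contains sh x = (PySem.Set.contains seen x && !(pvIsSoft x))) →
      (∀ x, PySem.Set.contains ss x = (PySem.Set.contains seen x && pvIsSoft x)) →
      splitLoopA skills hard soft sh ss =
        (hard ++ (pureDedup skills seen).filter (fun sk => !(pvIsSoft (PySem.Str.lower sk))),
         soft ++ (pureDedup skills seen).filter (fun sk => pvIsSoft (PySem.Str.lower sk))) := by
  induction skills with
  | nil => intro hard soft sh ss seen _ _; simp [splitLoopA, pureDedup]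
  | cons t ts ih =>
    intro hard soft sh ss seen hH hS
    have hisoft : (softSkillHints.any (fun hint => PySem.Str.isIn hint (PySem.Str.lower t)) || PySem.Set.contains genericSoftSkills (PySem.Str.lower t)) = pvIsSoft (PySem.Str.lower t) := rfl
    simp only [splitLoopA, pureDedup, hisoft]
    by_cases hb : pvIsSoft (PySem.Str.lower t) = true
    · rw [if_pos hb]
      by_cases hseen : PySem.Set.contains seen (PySem.Str.lower t) = true
      · have h1 : PySem.Set.contains ss (PySem.Str.lower t) = true := by
          rw [hS, hseen, hb]; rfl
        rw [if_pos h1, if_pos hseen]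
        exact ih hard soft sh ss seen hH hS
      · simp only [Bool.not_eq_true] at hseen
        have hseenm : PySem.Str.lower t ∉ seen := by simpa using hseen
        have h1 : PySem.Set.contains ss (PySem.Str.lower t) = false := by
          rw [hS, hseen]; rfl
        rw [if_neg (by rw [h1]; exact Bool.false_ne_true),
            if_neg (by rw [hseen]; exact Bool.false_ne_true)]
        rw [ih hard (soft ++ [t]) sh (PySem.Set.add ss (PySem.Str.lower t)) (PySem.Set.add seen (PySem.Str.lower t))
            (fun x => by
              rw [hH x, contains_add]
              by_cases hx : PySem.Str.lower t = x
              · subst hx; simp [hseenm, hb]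
              · simp [beq_false_of_ne hx])
            (fun x => by
              rw [contains_add, hS x, contains_add]
              by_cases hx : PySem.Str.lower t = x
              · subst hx; simp [hseenm, hb]
              · simp [beq_false_of_ne hx])]
        simp [hb]
    · simp only [Bool.not_eq_true] at hb
      rw [if_neg (by rw [hb]; exact Bool.false_ne_true)]
      by_cases hseen : PySem.Set.contains seen (PySem.Str.lower t) = true
      · have h1 : PySem.Set.contains sh (PySem.Str.lower t) = true := by
          rw [hH, hseen, hb]; rfl
        rw [if_pos h1, if_pos hseen]
        exact ih hard soft sh ss seen hH hS
      · simp only [Bool.not_eq_true] at hseen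
        have hseenm : PySem.Str.lower t ∉ seen := by simpa using hseen
        have h1 : PySem.Set.contains sh (PySem.Str.lower t) = false := by
          rw [hH, hseen]; rfl
        rw [if_neg (by rw [h1]; exact Bool.false_ne_true),
            if_neg (by rw [hseen]; exact Bool.false_ne_true)]
        rw [ih (hard ++ [t]) soft (PySem.Set.add sh (PySem.Str.lower t)) ss (PySem.Set.add seen (PySem.Str.lower t))
            (fun x => by
              rw [contains_add, hH x, contains_add]
              by_cases hx : PySem.Str.lower t = x
              · subst hx; simp [hseenm, hb]
              · simp [beq_false_of_ne hx])
            (fun x => by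
              rw [hS x, contains_add]
              by_cases hx : PySem.Str.lower t = x
              · subst hx; simp [hseenm, hb]
              · simp [beq_false_of_ne hx])]
        simp [hb]

-- ===== VERDICT (by name: the statement is the Claim_ definition above) =====
theorem split_hard_soft_skills_spec : Claim_equal_split_hard_soft_skills := by
  intro skills _
  unfold Spec_split_hard_soft_skills split_hard_soft_skills split_hard_soft_skills_alt
  rw [dedupLoopB_eq_pureDedup, List.nil_append]
  exact splitLoopA_eq skills [] [] PySem.Set.empty PySem.Set.empty PySem.Set.empty
    (fun x => by simp [PySem.Set.empty, PySem.Set.contains]) (fun x => by simp [PySem.Set.empty, PySem.Set.contains])
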